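-- pv_equiv track=rewrite | github.com/dmikushin/printing_kiosk | simple_print_server/page_range.py | format_page_list
-- ===== SOURCE A (Python) =====
-- def format_page_list(pages):
--     """Render a list of pages back as a compact range string for display.
--
--     [1,2,3,5,7,8] -> "1-3, 5, 7-8"
--     """
--     if not pages:
--         return ""
--     pages = sorted(set(pages))
--     out = []
--     run_start = pages[0]
--     prev = pages[0]
--     for p in pages[1:]:
--         if p == prev + 1:
--             prev = p
--             continue
--         if run_start == prev:
--             out.append(str(run_start))
--         else:
--             out.append("{}-{}".format(run_start, prev))
--         run_start = p
--         prev = p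
--     if run_start == prev:
--         out.append(str(run_start))
--     else:
--         out.append("{}-{}".format(run_start, prev))
--     return ", ".join(out)
-- ===== SOURCE B (Python) =====
-- def format_page_list(pages):
--     """Render a list of pages back as a compact range string for display.
--
--     [1,2,3,5,7,8] -> "1-3, 5, 7-8"
--     """
--     if not pages:
--         return ""
--     s = set(pages)
--     starts = sorted(p for p in s if p - 1 not in s)
--     ends = sorted(p for p in s if p + 1 not in s)
--     return ", ".join(str(a) if a == b else "{}-{}".format(a, b)
--                     for a, b in zip(starts, ends))
-- ===== Notes on version B (the rewrite author's own statement) =====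
-- stated objective: alternative
-- what changed: B replaces A's sequential run_start/prev state machine by a set-theoretic characterization of runs: a page starts a run iff p-1 is not in the set and ends one iff p+1 is not, so B filters the set twice for boundary pages, sorts the two boundary lists and zips them into (start,end) pairs before formatting.
import Mathlib
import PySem

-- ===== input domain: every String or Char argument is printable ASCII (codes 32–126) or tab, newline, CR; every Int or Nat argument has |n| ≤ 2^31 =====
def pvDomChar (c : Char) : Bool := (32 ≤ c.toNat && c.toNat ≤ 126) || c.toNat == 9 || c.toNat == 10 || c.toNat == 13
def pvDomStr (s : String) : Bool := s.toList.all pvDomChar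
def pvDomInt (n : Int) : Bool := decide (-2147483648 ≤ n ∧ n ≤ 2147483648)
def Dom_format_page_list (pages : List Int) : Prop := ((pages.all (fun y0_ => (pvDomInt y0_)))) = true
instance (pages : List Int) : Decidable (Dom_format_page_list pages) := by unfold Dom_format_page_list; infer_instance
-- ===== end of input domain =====

-- B replaces A's sequential run_start/prev state machine by a set-theoretic
-- characterization of runs: a page starts a run iff p-1 is not in the set and ends
-- one iff p+1 is not; B zips the sorted boundary lists into (start,end) pairs.

-- ===== PORT A =====
-- A's loop over pages[1:] with state (out, run_start, prev), then the final flush.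
def format_page_list (pages : List Int) : String :=
  if pages = [] then ""
  else
    match PySem.List.sorted (PySem.Set.ofList pages) (fun x => x) false with
    | [] => ""   -- unreachable totality guard: sorted(set(pages)) is nonempty here
    | x :: rest =>
      let st := rest.foldl
        (fun (st : List String × Int × Int) p =>
          let (out, run_start, prev) := st
          if p = prev + 1 then (out, run_start, p)
          else
            (out ++ [if run_start = prev then PySem.Int.toStr run_start
                     else PySem.Int.toStr run_start ++ "-" ++ PySem.Int.toStr prev],
             p, p))
        ([], x, x)
      let (out, run_start, prev) := st
      PySem.Str.join ", "
        (out ++ [if run_start = prev then PySem.Int.toStr run_start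
                 else PySem.Int.toStr run_start ++ "-" ++ PySem.Int.toStr prev])

-- ===== PORT B =====
-- Source B's formatting of one (start, end) pair
def pvFmt (r : Int × Int) : String :=
  if r.1 = r.2 then PySem.Int.toStr r.1
  else PySem.Int.toStr r.1 ++ "-" ++ PySem.Int.toStr r.2

def format_page_list_alt (pages : List Int) : String :=
  if pages = [] then ""
  else
    let s := PySem.Set.ofList pages
    let starts := PySem.List.sorted (s.filter (fun p => !(PySem.Set.contains s (p - 1)))) (fun x => x) false
    let ends := PySem.List.sorted (s.filter (fun p => !(PySem.Set.contains s (p + 1)))) (fun x => x) false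
    PySem.Str.join ", " ((starts.zip ends).map pvFmt)

-- ===== PRECONDITION & SPEC =====
def Spec_format_page_list (pages : List Int) (out : String) : Prop := out = format_page_list_alt pages
instance (pages : List Int) (out : String) : Decidable (Spec_format_page_list pages out) := by unfold Spec_format_page_list; infer_instance

-- ===== CLAIM =====
def Claim_equal_format_page_list : Prop := ∀ (pages : List Int), Dom_format_page_list pages → Spec_format_page_list pages (format_page_list pages)

-- ===== LEMMAS AND PROOFS =====

-- the (start, end) pairs of the maximal consecutive runs of a strictly increasing list
def pvGo (a b : Int) : List Int → List (Int × Int)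
  | [] => [(a, b)]
  | p :: t => if p = b + 1 then pvGo a p t else (a, b) :: pvGo p p t

def pvRuns : List Int → List (Int × Int)
  | [] => []
  | x :: t => pvGo x x t

-- pvGo's end and tail are independent of the running start a
theorem pvGo_ex (t : List Int) : ∀ b : Int, ∃ e r, ∀ a : Int, pvGo a b t = (a, e) :: r := by
  induction t with
  | nil => exact fun b => ⟨b, [], fun a => rfl⟩
  | cons p t ih =>
    intro b
    by_cases hp : p = b + 1
    · subst hp
      obtain ⟨e, r, h⟩ := ih (b + 1)
      exact ⟨e, r, fun a => by simpa [pvGo] using h a⟩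
    · exact ⟨b, pvGo p p t, fun a => by simp [pvGo, hp]⟩

-- A's loop with state (out, s, pv) produces out ++ the formatted runs pvGo s pv t
theorem pv_keyA (t : List Int) : ∀ (out : List String) (s pv : Int),
    (let st := t.foldl
        (fun (st : List String × Int × Int) p =>
          let (o, run_start, prev) := st
          if p = prev + 1 then (o, run_start, p)
          else
            (o ++ [if run_start = prev then PySem.Int.toStr run_start
                   else PySem.Int.toStr run_start ++ "-" ++ PySem.Int.toStr prev],
             p, p))
        (out, s, pv)
     st.1 ++ [if st.2.1 = st.2.2 then PySem.Int.toStr st.2.1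
              else PySem.Int.toStr st.2.1 ++ "-" ++ PySem.Int.toStr st.2.2]) =
    out ++ (pvGo s pv t).map pvFmt := by
  induction t with
  | nil => intro out s pv; simp [pvGo, pvFmt]
  | cons p t ih =>
    intro out s pv
    by_cases hp : p = pv + 1
    · subst hp
      simpa [pvGo] using ih out s (pv + 1)
    · have h := ih (out ++ [pvFmt (s, pv)]) p p
      rw [show pvGo s pv (p :: t) = (s, pv) :: pvGo p p t from by simp [pvGo, hp]]
      simp only [List.foldl_cons, if_neg hp]
      simpa [pvFmt, List.append_assoc] using h

-- dropping a fresh head from the ambient list of the membership test inside a filter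
theorem pv_filter_drop (t l : List Int) (x : Int) (f : Int → Int) (h : ∀ p ∈ t, f p ≠ x) :
    t.filter (fun p => !(decide (f p ∈ x :: l))) = t.filter (fun p => !(decide (f p ∈ l))) := by
  apply List.filter_congr
  intro p hp
  have : (f p ∈ x :: l) ↔ (f p ∈ l) := by simp [List.mem_cons, h p hp]
  simp [this]

-- the zip of the two boundary filters of a strictly increasing list is its run list
theorem pv_zip (L : List Int) (hL : L.Pairwise (· < ·)) :
    (L.filter (fun p => !(decide ((p - 1) ∈ L)))).zip
      (L.filter (fun p => !(decide ((p + 1) ∈ L)))) = pvRuns L := by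
  induction L with
  | nil => rfl
  | cons x t ih =>
    obtain ⟨hx, ht⟩ := List.pairwise_cons.mp hL
    -- x - 1 is never in x :: t, so x is always a run start
    have hSmem : ¬ ((x - 1) ∈ x :: t) := by
      simp only [List.mem_cons, not_or]
      exact ⟨by omega, fun h => absurd (hx _ h) (by omega)⟩
    have hS : ((x :: t).filter (fun p => !(decide ((p - 1) ∈ (x :: t))))) =
        x :: t.filter (fun p => !(decide ((p - 1) ∈ (x :: t)))) :=
      List.filter_cons_of_pos (by simp [hSmem])
    by_cases hx1 : (x + 1) ∈ t
    · -- x's run continues into t: t's head is x + 1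
      cases t with
      | nil => simp at hx1
      | cons y t' =>
        have hy := (List.pairwise_cons.mp ht).1
        have hxy : x < y := hx y (by simp)
        have hyx : y = x + 1 := by
          rcases List.mem_cons.mp hx1 with h | h
          · omega
          · have := hy _ h; omega
        subst hyx
        -- starts of x :: t: x, then the starts of t minus t's head x + 1
        have h1 : (((x + 1) :: t').filter (fun p => !(decide ((p - 1) ∈ x :: (x + 1) :: t')))) =
            t'.filter (fun p => !(decide ((p - 1) ∈ (x + 1) :: t'))) := by
          rw [List.filter_cons_of_neg (by simp)]
          exact pv_filter_drop t' ((x + 1) :: t') x (fun p => p - 1)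
            (fun p hp => by show p - 1 ≠ x; have := hy p hp; omega)
        have h2 : (((x + 1) :: t').filter (fun p => !(decide ((p - 1) ∈ (x + 1) :: t')))) =
            (x + 1) :: t'.filter (fun p => !(decide ((p - 1) ∈ (x + 1) :: t'))) := by
          apply List.filter_cons_of_pos
          have hxt' : x ∉ t' := fun h => by have := hy x h; omega
          simp [hxt']
        -- ends of x :: t are exactly the ends of t
        have h3 : ((x :: (x + 1) :: t').filter (fun p => !(decide ((p + 1) ∈ x :: (x + 1) :: t')))) =
            ((x + 1) :: t').filter (fun p => !(decide ((p + 1) ∈ (x + 1) :: t'))) := by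
          rw [List.filter_cons_of_neg (by simp)]
          exact pv_filter_drop ((x + 1) :: t') ((x + 1) :: t') x (fun p => p + 1)
            (fun p hp => by show p + 1 ≠ x; have := hx p hp; omega)
        obtain ⟨e, r, hgo⟩ := pvGo_ex t' (x + 1)
        have hIH := ih ht
        rw [h2] at hIH
        simp only [pvRuns, hgo (x + 1)] at hIH
        rw [hS, h1, h3]
        cases hE : ((x + 1) :: t').filter (fun p => !(decide ((p + 1) ∈ (x + 1) :: t'))) with
        | nil => rw [hE] at hIH; simp at hIH
        | cons e0 E =>
          rw [hE] at hIH
          simp only [List.zip_cons_cons, List.cons.injEq, Prod.mk.injEq] at hIH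
          obtain ⟨⟨-, he0⟩, hrest⟩ := hIH
          rw [List.zip_cons_cons]
          rw [show pvRuns (x :: (x + 1) :: t') = pvGo x (x + 1) t' from by simp [pvRuns, pvGo]]
          rw [hgo x, he0, hrest]
    · -- x's run is x alone
      have h1 : (t.filter (fun p => !(decide ((p - 1) ∈ x :: t)))) =
          t.filter (fun p => !(decide ((p - 1) ∈ t))) :=
        pv_filter_drop t t x (fun p => p - 1) (fun p hp => by
          show p - 1 ≠ x
          intro h
          have hpx : p = x + 1 := by omega
          exact hx1 (hpx ▸ hp))
      have h2 : ((x :: t).filter (fun p => !(decide ((p + 1) ∈ x :: t)))) =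
          x :: t.filter (fun p => !(decide ((p + 1) ∈ t))) := by
        have hx1' : (x + 1) ∉ x :: t := by
          simp only [List.mem_cons, not_or]
          exact ⟨by omega, hx1⟩
        rw [List.filter_cons_of_pos (by simp [hx1'])]
        rw [pv_filter_drop t t x (fun p => p + 1) (fun p hp => by show p + 1 ≠ x; have := hx p hp; omega)]
      rw [hS, h1, h2]
      simp only [List.zip_cons_cons, ih ht]
      cases t with
      | nil => rfl
      | cons y t' =>
        have hyne : ¬ (y = x + 1) := fun h => hx1 (by simp [h])
        simp [pvRuns, pvGo, hyne]

-- sorting commutes with a filter of the deduplicated input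
theorem pv_sorted_filter (s : List Int) (P : Int → Bool)
    (hs : (PySem.List.sorted s (fun x => x) false).Pairwise (· < ·)) :
    PySem.List.sorted (s.filter P) (fun x => x) false =
      (PySem.List.sorted s (fun x => x) false).filter P := by
  apply PySem.List.sorted_eq_of_perm_of_pairwise_lt
  · exact (PySem.List.sorted_perm s (fun x => x) false).filter P
  · exact hs.filter P

-- ===== VERDICT =====

theorem format_page_list_spec : Claim_equal_format_page_list := by
  unfold Claim_equal_format_page_list
  intro pages _
  unfold Spec_format_page_list format_page_list format_page_list_alt
  by_cases hp : pages = []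
  · simp [hp]
  · simp only [if_neg hp]
    set s := PySem.Set.ofList pages with hs
    set L := PySem.List.sorted s (fun x => x) false with hLdef
    have hL : L.Pairwise (· < ·) := PySem.List.sorted_ofList_pairwise_lt pages
    have hmemL : ∀ z : Int, (z ∈ s) ↔ (z ∈ L) := by
      intro z
      simp [hLdef, PySem.List.mem_sorted]
    have hcont : ∀ (f : Int → Int),
        s.filter (fun p => !(PySem.Set.contains s (f p))) =
          s.filter (fun p => !(decide ((f p) ∈ L))) := by
      intro f
      apply List.filter_congr
      intro p _
      simp [PySem.Set.contains, hmemL (f p)]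
    have hstarts : PySem.List.sorted (s.filter (fun p => !(PySem.Set.contains s (p - 1)))) (fun x => x) false
        = L.filter (fun p => !(decide ((p - 1) ∈ L))) := by
      rw [hcont (fun p => p - 1)]
      exact pv_sorted_filter s _ hL
    have hends : PySem.List.sorted (s.filter (fun p => !(PySem.Set.contains s (p + 1)))) (fun x => x) false
        = L.filter (fun p => !(decide ((p + 1) ∈ L))) := by
      rw [hcont (fun p => p + 1)]
      exact pv_sorted_filter s _ hL
    cases hLcase : L with
    | nil =>
      -- impossible: pages ≠ [] so L ≠ []
      exfalso
      obtain ⟨q, hq⟩ := List.exists_mem_of_ne_nil pages hp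
      have : q ∈ L := (hmemL q).mp (by simp [hs, PySem.Set.mem_ofList, hq])
      rw [hLcase] at this
      simp at this
    | cons x rest =>
      rw [hLcase] at hstarts hends
      simp only [hstarts, hends]
      rw [pv_zip (x :: rest) (hLcase ▸ hL)]
      have hA := pv_keyA rest [] x x
      simp only [List.nil_append] at hA
      simp only [pvRuns]
      exact congrArg (PySem.Str.join ", ") hA
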